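-- pv_equiv track=rewrite | github.com/AlexanderHargrave/CrackingCandyCrush | candy_simulation.py | find_all_matches
-- ===== SOURCE A (Python) =====
-- def normalize_candy_name(label):
--     """
--     Extracts the base candy color/type from a label or a (box, label) tuple.
--     """
--     if isinstance(label, tuple):
--         label = label[1]
--     base = label.split('_')[0]
--     if base.endswith(('H', 'V', 'W', 'F')):
--         return base[:-1]
--     return base
--
-- def is_movable(label):
--     """
--     Returns True if the tile is a normal, swappable candy.
--     Filters out frosting, marmalade, bubblegum, gap, loader, etc.
--     """
--
--     if isinstance(label, tuple):
--         label = label[1]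
--     lowered = label.lower()
--     if any(x in lowered for x in ["frosting", "marmalade", "gap", "loader", "bubblegum", "empty", "lock", "pinball"]):
--         return False
--     return True
--
-- def is_non_interactive(label):
--     if isinstance(label, tuple):
--         label = label[1]
--     lowered = label.lower().replace(" ", "_")
--     return any(x in lowered for x in ["liquorice", "dragon_egg"])
--
-- def is_chocolate(label):
--     if isinstance(label, tuple):
--         label = label[1]
--     if "bomb" in label:
--         return True
--     return False
--
-- def find_all_matches(candy_grid):
--     """
--     Finds all horizontal and vertical matches of 3 or more candies.
--     Returns a set of (r, c) positions that are part of matches.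
--     Only includes movable, matchable candies (excludes frosting, bubblegum, etc.).
--     This is done after a move to identify all current game state.
--     """
--     rows, cols = len(candy_grid), len(candy_grid[0])
--     matched = set()
--
--     def get_label(r, c):
--         label = candy_grid[r][c]
--         return normalize_candy_name(label)
--
--     def is_matchable(r, c):
--         label = candy_grid[r][c]
--         return is_movable(label) and not is_chocolate(label) and not is_non_interactive(label)
--
--     # Horizontal matches
--     for r in range(rows):
--         c = 0
--         while c < cols - 2:
--             if not is_matchable(r, c):
--                 c += 1
--                 continue
--             label = get_label(r, c)
--             count = 1
--             while c + count < cols and is_matchable(r, c + count) and get_label(r, c + count) == label: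
--                 count += 1
--             if count >= 3:
--                 for i in range(count):
--                     if (r,c+i) not in matched:
--
--                         matched.add((r, c + i))
--             c += max(count, 1)
--
--     # Vertical matches
--     for c in range(cols):
--         r = 0
--         while r < rows - 2:
--             if not is_matchable(r, c):
--                 r += 1
--                 continue
--             label = get_label(r, c)
--             count = 1
--             while r + count < rows and is_matchable(r + count, c) and get_label(r + count, c) == label:
--                 count += 1
--             if count >= 3:
--                 for i in range(count):
--                     if (r+i, c) not in matched:
--                         matched.add((r + i, c))
--             r += max(count, 1)
--
--     return matched
-- ===== SOURCE B (Python) =====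
-- def normalize_candy_name(label):
--     if isinstance(label, tuple):
--         label = label[1]
--     base = label.split('_')[0]
--     if base.endswith(('H', 'V', 'W', 'F')):
--         return base[:-1]
--     return base
--
-- def is_movable(label):
--     if isinstance(label, tuple):
--         label = label[1]
--     lowered = label.lower()
--     if any(x in lowered for x in ["frosting", "marmalade", "gap", "loader", "bubblegum", "empty", "lock", "pinball"]):
--         return False
--     return True
--
-- def is_non_interactive(label):
--     if isinstance(label, tuple):
--         label = label[1]
--     lowered = label.lower().replace(" ", "_")
--     return any(x in lowered for x in ["liquorice", "dragon_egg"])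
--
-- def is_chocolate(label):
--     if isinstance(label, tuple):
--         label = label[1]
--     return "bomb" in label
--
-- def find_all_matches(candy_grid):
--     """Sliding window of 3: a cell is matched iff some window of three
--     consecutive matchable, equally-labelled cells covers it. No run counter."""
--     rows, cols = len(candy_grid), len(candy_grid[0])
--
--     def key(r, c):
--         label = candy_grid[r][c]
--         if is_movable(label) and not is_chocolate(label) and not is_non_interactive(label):
--             return normalize_candy_name(label)
--         return None
--
--     matched = set()
--     for r in range(rows):
--         for c in range(cols - 2):
--             k = key(r, c)
--             if k is not None and key(r, c + 1) == k and key(r, c + 2) == k: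
--                 matched.update({(r, c), (r, c + 1), (r, c + 2)})
--     for c in range(cols):
--         for r in range(rows - 2):
--             k = key(r, c)
--             if k is not None and key(r + 1, c) == k and key(r + 2, c) == k:
--                 matched.update({(r, c), (r + 1, c), (r + 2, c)})
--     return matched
-- ===== Notes on version B (the rewrite author's own statement) =====
-- stated objective: alternative
-- what changed: A's run-length scan (while loop growing a maximal-run counter, then skipping ahead by the run length) is replaced by a stateless sliding window: every consecutive triple of cells is tested independently and its three positions added when all three are matchable with equal normalized labels; overlapping windows cover exactly the cells of runs of length >= 3.
-- outside the precondition, e.g. on find_all_matches([['a', 'b', 'c'], ['x', 'y']]): A returns set(), B returns set()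
import Mathlib
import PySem

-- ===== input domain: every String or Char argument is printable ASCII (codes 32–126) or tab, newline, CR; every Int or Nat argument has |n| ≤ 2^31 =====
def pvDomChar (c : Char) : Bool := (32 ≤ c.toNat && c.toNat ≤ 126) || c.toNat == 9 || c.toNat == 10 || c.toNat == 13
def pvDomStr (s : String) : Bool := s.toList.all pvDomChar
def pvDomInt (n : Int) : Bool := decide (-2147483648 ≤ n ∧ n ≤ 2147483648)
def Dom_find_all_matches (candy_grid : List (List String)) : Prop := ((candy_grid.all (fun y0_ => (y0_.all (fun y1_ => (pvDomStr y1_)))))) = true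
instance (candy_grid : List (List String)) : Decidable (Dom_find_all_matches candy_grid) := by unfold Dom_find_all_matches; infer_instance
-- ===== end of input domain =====

-- B replaces A's run-length while-loop scan (maximal-run counter plus skip-ahead) by a
-- stateless sliding window of 3 consecutive cells; same cost class, objective: alternative.
-- A returns a Python set; the equivalence is about the returned set (ports build PySem.Set).

-- ===== PORT A =====
-- shared same-module helpers (labels are strings here, so the tuple branch of the Python is vacuous)
def pv_normalize (label : String) : String :=
  let base := ((PySem.Str.split? label "_").getD []).getD 0 ""
  if PySem.Str.endswith base "H" || PySem.Str.endswith base "V" ||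
     PySem.Str.endswith base "W" || PySem.Str.endswith base "F" then
    PySem.Str.slice base none (some (-1))
  else base

def pv_is_movable (label : String) : Bool :=
  let lowered := PySem.Str.lower label
  if (["frosting", "marmalade", "gap", "loader", "bubblegum", "empty", "lock", "pinball"].any
      (fun x => PySem.Str.isIn x lowered)) then false else true

def pv_is_non_interactive (label : String) : Bool :=
  let lowered := PySem.Str.replace (PySem.Str.lower label) " " "_"
  ["liquorice", "dragon_egg"].any (fun x => PySem.Str.isIn x lowered)

def pv_is_chocolate (label : String) : Bool :=
  if PySem.Str.isIn "bomb" label then true else false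

def pv_matchable (label : String) : Bool :=
  pv_is_movable label && !pv_is_chocolate label && !pv_is_non_interactive label

def pv_cell (g : List (List String)) (r c : Nat) : String := (g.getD r []).getD c ""

-- the inner `while … count += 1` of A
def pv_countRun (n : Nat) (ok : Nat → Bool) (lab : Nat → String) (lab0 : String)
    (c count : Nat) : Nat :=
  if h : c + count < n ∧ ok (c + count) = true ∧ lab (c + count) = lab0 then
    pv_countRun n ok lab lab0 c (count + 1)
  else count
termination_by n - (c + count)
decreasing_by omega

-- `for i in range(count): if … not in matched: matched.add(…)` (Set.add checks membership)
def pv_addRun (pos : Nat → Int × Int) (s : PySem.Set (Int × Int)) (c count : Nat) :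
    PySem.Set (Int × Int) :=
  (List.range count).foldl (fun s i => PySem.Set.add s (pos (c + i))) s

-- the outer `while c < cols - 2` scan of A, generic in the line being scanned
def pv_scanA (n : Nat) (ok : Nat → Bool) (lab : Nat → String) (pos : Nat → Int × Int)
    (c : Nat) (s : PySem.Set (Int × Int)) : PySem.Set (Int × Int) :=
  if _h : c < n - 2 then
    if ok c then
      let count := pv_countRun n ok lab (lab c) c 1
      let s' := if 3 ≤ count then pv_addRun pos s c count else s
      pv_scanA n ok lab pos (c + max count 1) s'
    else pv_scanA n ok lab pos (c + 1) s
  else s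
termination_by n - c
decreasing_by all_goals omega

def find_all_matches (candy_grid : List (List String)) : List (Int × Int) :=
  let rows := candy_grid.length
  let cols := (candy_grid.getD 0 []).length
  let s1 := (List.range rows).foldl
    (fun s r => pv_scanA cols
      (fun c => decide (c < cols) && pv_matchable (pv_cell candy_grid r c))
      (fun c => pv_normalize (pv_cell candy_grid r c))
      (fun c => ((r : Int), (c : Int))) 0 s) PySem.Set.empty
  (List.range cols).foldl
    (fun s c => pv_scanA rows
      (fun r => decide (r < rows) && pv_matchable (pv_cell candy_grid r c))
      (fun r => pv_normalize (pv_cell candy_grid r c))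
      (fun r => ((r : Int), (c : Int))) 0 s) s1

-- ===== PORT B =====
-- B's `key`: the normalized label of a matchable cell, None otherwise
def pv_key (g : List (List String)) (r c : Nat) : Option String :=
  let label := pv_cell g r c
  if pv_matchable label then some (pv_normalize label) else none

-- one sliding window of 3 starting at index c
def pv_stepB (key : Nat → Option String) (pos : Nat → Int × Int)
    (s : PySem.Set (Int × Int)) (c : Nat) : PySem.Set (Int × Int) :=
  match key c with
  | none => s
  | some k =>
    if key (c + 1) = some k ∧ key (c + 2) = some k then
      PySem.Set.add (PySem.Set.add (PySem.Set.add s (pos c)) (pos (c + 1))) (pos (c + 2))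
    else s

def pv_scanB (n : Nat) (key : Nat → Option String) (pos : Nat → Int × Int)
    (s : PySem.Set (Int × Int)) : PySem.Set (Int × Int) :=
  (List.range (n - 2)).foldl (pv_stepB key pos) s

def find_all_matches_alt (candy_grid : List (List String)) : List (Int × Int) :=
  let rows := candy_grid.length
  let cols := (candy_grid.getD 0 []).length
  let s1 := (List.range rows).foldl
    (fun s r => pv_scanB cols (fun c => pv_key candy_grid r c)
      (fun c => ((r : Int), (c : Int))) s) PySem.Set.empty
  (List.range cols).foldl
    (fun s c => pv_scanB rows (fun r => pv_key candy_grid r c)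
      (fun r => ((r : Int), (c : Int))) s) s1

-- ===== PRECONDITION & SPEC =====
-- Pre_ excludes the empty grid (A raises IndexError on candy_grid[0]) and ragged grids in
-- which some row is shorter than the first row: there A's cell accesses generally raise
-- IndexError; on the few such grids where the scans stop before the missing cells A still
-- returns, and B returns the same set there — see cites.
def Pre_find_all_matches (candy_grid : List (List String)) : Prop :=
  candy_grid ≠ [] ∧ ∀ row ∈ candy_grid, (candy_grid.headD []).length ≤ row.length
instance (candy_grid : List (List String)) : Decidable (Pre_find_all_matches candy_grid) := by
  unfold Pre_find_all_matches; infer_instance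

def pvWitness_find_all_matches : List (List String) :=
  [["red", "red", "redH"], ["blue", "bomb", "red"], ["blue_x", "gap", "red"]]

def Spec_find_all_matches (candy_grid : List (List String)) (out : List (Int × Int)) : Prop := out = find_all_matches_alt candy_grid
instance (candy_grid : List (List String)) (out : List (Int × Int)) : Decidable (Spec_find_all_matches candy_grid out) := by unfold Spec_find_all_matches; infer_instance

-- ===== CLAIM (what is proved, stated in full; the proofs are below) =====
def Claim_equal_find_all_matches : Prop := ∀ (candy_grid : List (List String)), Dom_find_all_matches candy_grid → Pre_find_all_matches candy_grid → Spec_find_all_matches candy_grid (find_all_matches candy_grid)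

-- ===== LEMMAS AND PROOFS =====

-- B's step written through ok/lab instead of key
theorem pv_stepB_keyOf (ok : Nat → Bool) (lab : Nat → String) (pos : Nat → Int × Int)
    (s : PySem.Set (Int × Int)) (j : Nat) :
    pv_stepB (fun i => if ok i then some (lab i) else none) pos s j =
      if ok j = true ∧ ok (j + 1) = true ∧ ok (j + 2) = true ∧
         lab (j + 1) = lab j ∧ lab (j + 2) = lab j then
        PySem.Set.add (PySem.Set.add (PySem.Set.add s (pos j)) (pos (j + 1))) (pos (j + 2))
      else s := by
  by_cases h0 : ok j <;> by_cases h1 : ok (j + 1) <;> by_cases h2 : ok (j + 2) <;>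
    simp [pv_stepB, h0, h1, h2]

-- properties of A's inner run counter
theorem pv_countRun_unfold (n : Nat) (ok : Nat → Bool) (lab : Nat → String) (lab0 : String)
    (c count : Nat) :
    pv_countRun n ok lab lab0 c count =
      if c + count < n ∧ ok (c + count) = true ∧ lab (c + count) = lab0 then
        pv_countRun n ok lab lab0 c (count + 1)
      else count := by
  rw [pv_countRun]; split_ifs <;> rfl

theorem pv_countRun_props (n : Nat) (ok : Nat → Bool) (lab : Nat → String) (lab0 : String)
    (c : Nat) : ∀ (fuel count : Nat), n - (c + count) ≤ fuel →
    count ≤ pv_countRun n ok lab lab0 c count ∧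
    (∀ i, count ≤ i → i < pv_countRun n ok lab lab0 c count →
      c + i < n ∧ ok (c + i) = true ∧ lab (c + i) = lab0) ∧
    ¬(c + pv_countRun n ok lab lab0 c count < n ∧
      ok (c + pv_countRun n ok lab lab0 c count) = true ∧
      lab (c + pv_countRun n ok lab lab0 c count) = lab0) := by
  intro fuel
  induction fuel with
  | zero =>
    intro count hf
    rw [pv_countRun_unfold, if_neg (by intro h; omega)]
    exact ⟨le_rfl, fun i h1 h2 => by omega, by intro h; omega⟩
  | succ fuel ih =>
    intro count hf
    rw [pv_countRun_unfold]
    by_cases h : c + count < n ∧ ok (c + count) = true ∧ lab (c + count) = lab0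
    · rw [if_pos h]
      obtain ⟨i1, i2, i3⟩ := ih (count + 1) (by omega)
      refine ⟨by omega, fun i hi1 hi2 => ?_, i3⟩
      by_cases he : i = count
      · subst he; exact ⟨h.1, h.2.1, h.2.2⟩
      · exact i2 i (by omega) hi2
    · rw [if_neg h]
      exact ⟨le_rfl, fun i h1 h2 => by omega, h⟩

-- the window condition ("fires") for a window starting at j
def pv_fire (ok : Nat → Bool) (lab : Nat → String) (j : Nat) : Prop :=
  ok j = true ∧ ok (j + 1) = true ∧ ok (j + 2) = true ∧
  lab (j + 1) = lab j ∧ lab (j + 2) = lab j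

-- the tail of B's fold, from window index c on
def pv_FB (n : Nat) (ok : Nat → Bool) (lab : Nat → String) (pos : Nat → Int × Int)
    (c : Nat) (s : PySem.Set (Int × Int)) : PySem.Set (Int × Int) :=
  (List.range' c (n - 2 - c)).foldl (pv_stepB (fun i => if ok i then some (lab i) else none) pos) s

theorem pv_FB_stop (n : Nat) (ok : Nat → Bool) (lab : Nat → String) (pos : Nat → Int × Int)
    (c : Nat) (s : PySem.Set (Int × Int)) (h : n - 2 ≤ c) : pv_FB n ok lab pos c s = s := by
  unfold pv_FB
  have : n - 2 - c = 0 := by omega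
  simp [this]

theorem pv_FB_unfold (n : Nat) (ok : Nat → Bool) (lab : Nat → String) (pos : Nat → Int × Int)
    (c : Nat) (s : PySem.Set (Int × Int)) (h : c < n - 2) :
    pv_FB n ok lab pos c s =
      pv_FB n ok lab pos (c + 1)
        (pv_stepB (fun i => if ok i then some (lab i) else none) pos s c) := by
  unfold pv_FB
  have h1 : n - 2 - c = (n - 2 - (c + 1)) + 1 := by omega
  rw [h1, List.range'_succ, List.foldl_cons]

theorem pv_FB_skip (n : Nat) (ok : Nat → Bool) (lab : Nat → String) (pos : Nat → Int × Int)
    (c : Nat) (s : PySem.Set (Int × Int)) (hfail : ¬ pv_fire ok lab c) :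
    pv_FB n ok lab pos c s = pv_FB n ok lab pos (c + 1) s := by
  unfold pv_fire at hfail
  rcases Nat.lt_or_ge c (n - 2) with h | h
  · rw [pv_FB_unfold n ok lab pos c s h, pv_stepB_keyOf, if_neg hfail]
  · rw [pv_FB_stop n ok lab pos c s h, pv_FB_stop n ok lab pos (c + 1) s (by omega)]

-- the firing segment: k+1 consecutive firing windows add exactly the k+3 covered cells
theorem pv_fold_fire (ok : Nat → Bool) (lab : Nat → String) (pos : Nat → Int × Int) :
    ∀ (k c : Nat) (s : PySem.Set (Int × Int)),
      (∀ j, j ≤ k → pv_fire ok lab (c + j)) →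
      (List.range' c (k + 1)).foldl
          (pv_stepB (fun i => if ok i then some (lab i) else none) pos) s =
        (List.range' c (k + 3)).foldl (fun s i => PySem.Set.add s (pos i)) s := by
  intro k
  induction k with
  | zero =>
    intro c s hf
    have hc := hf 0 (le_refl 0)
    simp only [Nat.add_zero] at hc
    unfold pv_fire at hc
    rw [List.range'_succ]
    simp only [List.foldl_cons]
    rw [pv_stepB_keyOf, if_pos hc]
    rw [show (3 : Nat) = 2 + 1 from rfl, List.range'_succ, List.range'_succ, List.range'_succ]
    simp [List.range'_zero]
  | succ k ih =>
    intro c s hf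
    rw [List.range'_succ, List.foldl_cons]
    rw [pv_stepB_keyOf, if_pos (by
      have := hf 0 (by omega)
      simp only [Nat.add_zero] at this
      unfold pv_fire at this
      exact this)]
    rw [ih (c + 1) _ (fun j hj => by
      have := hf (j + 1) (by omega)
      simpa [Nat.add_assoc, Nat.add_comm 1 j] using this)]
    -- RHS: peel the first cell
    rw [show k + 1 + 3 = (k + 3) + 1 from rfl, List.range'_succ, List.foldl_cons]
    -- now both sides fold adds of range' (c+1) (k+3), from states that agree as sets
    have hmem1 : pos (c + 1) ∈ PySem.Set.add (PySem.Set.add (PySem.Set.add s (pos c)) (pos (c + 1))) (pos (c + 2)) := by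
      simp [PySem.Set.mem_add]
    have hmem2 : pos (c + 2) ∈ PySem.Set.add (PySem.Set.add (PySem.Set.add s (pos c)) (pos (c + 1))) (pos (c + 2)) := by
      simp [PySem.Set.mem_add]
    rw [show k + 3 = (k + 1) + 2 from rfl, List.range'_succ, List.range'_succ]
    simp only [List.foldl_cons]
    rw [PySem.Set.add_of_mem hmem1, PySem.Set.add_of_mem hmem2]
    rfl

theorem pv_addRun_eq (pos : Nat → Int × Int) (s : PySem.Set (Int × Int)) (c count : Nat) :
    pv_addRun pos s c count =
      (List.range' c count).foldl (fun s i => PySem.Set.add s (pos i)) s := by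
  unfold pv_addRun
  rw [List.range'_eq_map_range, List.foldl_map]

-- main lemma: A's scan from c equals B's remaining windows from c, provided no window
-- straddles the boundary just before c
theorem pv_scan_eq_aux (n : Nat) (ok : Nat → Bool) (lab : Nat → String) (pos : Nat → Int × Int)
    (hok : ∀ i, n ≤ i → ok i = false) :
    ∀ (k c : Nat) (s : PySem.Set (Int × Int)), n - 2 - c ≤ k →
      (∀ j, j + 1 = c → ¬(ok j = true ∧ ok c = true ∧ lab c = lab j)) →
      pv_scanA n ok lab pos c s = pv_FB n ok lab pos c s := by
  intro k
  induction k with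
  | zero =>
    intro c s hk _
    rw [pv_FB_stop n ok lab pos c s (by omega)]
    rw [pv_scanA]
    simp only [dif_neg (by omega : ¬ c < n - 2)]
  | succ k ih =>
    intro c s hk hb
    rcases Nat.lt_or_ge c (n - 2) with hc | hc
    · rw [pv_scanA, dif_pos hc]
      by_cases hokc : ok c = true
      · simp only [hokc, if_true]
        set cnt := pv_countRun n ok lab (lab c) c 1 with hcnt
        clear_value cnt
        obtain ⟨h1, h2, h3⟩ := pv_countRun_props n ok lab (lab c) c (n + 1) 1 (by omega)
        rw [← hcnt] at h1 h2 h3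
        have hmax : max cnt 1 = cnt := by omega
        rw [hmax]
        -- the boundary just after the run always fails
        have hbnd : ¬(ok (c + cnt) = true ∧ lab (c + cnt) = lab c) := by
          intro ⟨ho, hl⟩
          rcases Nat.lt_or_ge (c + cnt) n with hlt | hge
          · exact h3 ⟨hlt, ho, hl⟩
          · rw [hok _ hge] at ho; exact Bool.noConfusion ho
        have hbnext : ∀ j, j + 1 = c + cnt → ¬(ok j = true ∧ ok (c + cnt) = true ∧ lab (c + cnt) = lab j) := by
          intro j hj ⟨hoj, ho, hl⟩
          have hjc : j = c + (cnt - 1) := by omega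
          have hlabj : lab j = lab c := by
            by_cases h1c : cnt = 1
            · have hjc' : j = c := by omega
              rw [hjc']
            · have := (h2 (cnt - 1) (by omega) (by omega)).2.2
              rw [hjc]; exact this
          exact hbnd ⟨ho, hl.trans hlabj⟩
        by_cases h3le : 3 ≤ cnt
        · simp only [h3le, if_true]
          -- windows c .. c+cnt-3 fire, c+cnt-2 and c+cnt-1 fail
          have hfire : ∀ j, j ≤ cnt - 3 → pv_fire ok lab (c + j) := by
            intro j hj
            have g : ∀ i, 1 ≤ i → i < cnt → ok (c + i) = true ∧ lab (c + i) = lab c := by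
              intro i hi1 hi2; exact ⟨(h2 i hi1 hi2).2.1, (h2 i hi1 hi2).2.2⟩
            have e0 : ok (c + j) = true ∧ lab (c + j) = lab c := by
              rcases Nat.eq_zero_or_pos j with rfl | hj0
              · exact ⟨by simpa using hokc, by norm_num⟩
              · exact g j (by omega) (by omega)
            have e1 := g (j + 1) (by omega) (by omega)
            have e2 := g (j + 2) (by omega) (by omega)
            refine ⟨e0.1, ?_, ?_, ?_, ?_⟩
            · rw [Nat.add_assoc]; exact e1.1
            · rw [Nat.add_assoc]; exact e2.1
            · rw [Nat.add_assoc, e1.2, e0.2]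
            · rw [Nat.add_assoc, e2.2, e0.2]
          have hsplit : n - 2 - c = (cnt - 2) + (n - 2 - (c + (cnt - 2))) := by
            have := (h2 (cnt - 1) (by omega) (by omega)).1
            omega
          have hfail1 : ¬ pv_fire ok lab (c + (cnt - 2)) := by
            intro hf
            unfold pv_fire at hf
            obtain ⟨-, -, hok2, -, hlab2⟩ := hf
            have e : c + (cnt - 2) + 2 = c + cnt := by omega
            rw [e] at hok2 hlab2
            have h2' : lab (c + (cnt - 2)) = lab c := (h2 (cnt - 2) (by omega) (by omega)).2.2
            rw [h2'] at hlab2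
            exact hbnd ⟨hok2, hlab2⟩
          have hfail2 : ¬ pv_fire ok lab (c + (cnt - 2) + 1) := by
            intro hf
            unfold pv_fire at hf
            obtain ⟨-, hok1, -, hlab1, -⟩ := hf
            have e : c + (cnt - 2) + 1 + 1 = c + cnt := by omega
            rw [e] at hok1 hlab1
            have e2 : c + (cnt - 2) + 1 = c + (cnt - 1) := by omega
            rw [e2] at hlab1
            have h2' : lab (c + (cnt - 1)) = lab c := (h2 (cnt - 1) (by omega) (by omega)).2.2
            rw [h2'] at hlab1
            exact hbnd ⟨hok1, hlab1⟩
          unfold pv_FB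
          rw [hsplit, ← List.range'_append, List.foldl_append]
          simp only [one_mul]
          have hff : List.foldl (pv_stepB (fun i => if ok i then some (lab i) else none) pos) s
              (List.range' c (cnt - 2)) = pv_addRun pos s c cnt := by
            have hfires := pv_fold_fire ok lab pos (cnt - 3) c s (fun j hj => hfire j hj)
            rw [show cnt - 2 = cnt - 3 + 1 from by omega, hfires,
               show cnt - 3 + 3 = cnt from by omega, ← pv_addRun_eq]
          rw [hff]
          show pv_scanA n ok lab pos (c + cnt) (pv_addRun pos s c cnt) =
            pv_FB n ok lab pos (c + (cnt - 2)) (pv_addRun pos s c cnt)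
          rw [ih (c + cnt) (pv_addRun pos s c cnt) (by omega) hbnext]
          rw [pv_FB_skip n ok lab pos (c + (cnt - 2)) _ hfail1,
              pv_FB_skip n ok lab pos (c + (cnt - 2) + 1) _ hfail2,
              show c + (cnt - 2) + 1 + 1 = c + cnt from by omega]
        · -- cnt = 1 or 2: no window fires, A adds nothing
          simp only [h3le, if_false]
          have hf1 : ¬ pv_fire ok lab c := by
            intro hf
            unfold pv_fire at hf
            rcases Nat.lt_or_ge 1 cnt with h1c | h1c
            · -- cnt = 2
              obtain ⟨-, -, hok2, -, hlab2⟩ := hf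
              have e : c + 2 = c + cnt := by omega
              rw [e] at hok2 hlab2
              exact hbnd ⟨hok2, hlab2⟩
            · -- cnt = 1
              obtain ⟨-, hok1, -, hlab1, -⟩ := hf
              have e : c + 1 = c + cnt := by omega
              rw [e] at hok1 hlab1
              exact hbnd ⟨hok1, hlab1⟩
          rcases Nat.lt_or_ge 1 cnt with h1c | h1c
          · -- cnt = 2
            have hf2 : ¬ pv_fire ok lab (c + 1) := by
              intro hf
              unfold pv_fire at hf
              obtain ⟨-, hok1, -, hlab1, -⟩ := hf
              have e : c + 1 + 1 = c + cnt := by omega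
              rw [e] at hok1 hlab1
              have hlab' : lab (c + 1) = lab c := (h2 1 (le_refl 1) (by omega)).2.2
              rw [hlab'] at hlab1
              exact hbnd ⟨hok1, hlab1⟩
            rw [ih (c + cnt) s (by omega) hbnext]
            rw [pv_FB_skip n ok lab pos c s hf1, pv_FB_skip n ok lab pos (c + 1) s hf2,
                show c + cnt = c + 1 + 1 from by omega]
          · -- cnt = 1
            rw [ih (c + cnt) s (by omega) hbnext]
            rw [pv_FB_skip n ok lab pos c s hf1, show c + cnt = c + 1 from by omega]
      · -- cell c not matchable: both sides skip it
        rw [if_neg hokc]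
        have hf : ¬ pv_fire ok lab c := fun hf => hokc hf.1
        rw [ih (c + 1) s (by omega) (fun j hj => by
          have : j = c := by omega
          subst this
          intro ⟨h, _, _⟩; exact hokc h)]
        rw [← pv_FB_skip n ok lab pos c s hf]
    · rw [pv_scanA, dif_neg (by omega), pv_FB_stop n ok lab pos c s hc]

-- A's scan = B's scan, for a line whose ok is false past the end and whose key agrees
theorem pv_scan_eq (n : Nat) (ok : Nat → Bool) (lab : Nat → String)
    (key : Nat → Option String) (pos : Nat → Int × Int)
    (hok : ∀ i, n ≤ i → ok i = false)
    (hkey : ∀ i, i < n → key i = if ok i then some (lab i) else none)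
    (s : PySem.Set (Int × Int)) :
    pv_scanA n ok lab pos 0 s = pv_scanB n key pos s := by
  rw [pv_scan_eq_aux n ok lab pos hok (n - 2) 0 s (by omega) (by omega)]
  unfold pv_FB pv_scanB
  rw [Nat.sub_zero, List.range_eq_range']
  refine (PySem.List.foldl_congr_mem _ _ _ _ ?_).symm
  intro acc x hx
  have hx3 : x + 2 < n := by
    have := List.mem_range'.mp hx
    omega
  unfold pv_stepB
  rw [hkey x (by omega), hkey (x + 1) (by omega), hkey (x + 2) (by omega)]

-- ===== VERDICT (by name: the statement is the Claim_ definition above) =====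
theorem find_all_matches_spec : Claim_equal_find_all_matches := by
  intro candy_grid _hdom _hpre
  unfold Spec_find_all_matches find_all_matches find_all_matches_alt
  have hline : ∀ (n : Nat) (cell : Nat → String) (pos : Nat → Int × Int)
      (s : PySem.Set (Int × Int)),
      pv_scanA n (fun i => decide (i < n) && pv_matchable (cell i))
        (fun i => pv_normalize (cell i)) pos 0 s =
      pv_scanB n (fun i => if pv_matchable (cell i) then some (pv_normalize (cell i)) else none)
        pos s := by
    intro n cell pos s
    apply pv_scan_eq
    · intro i hi; simp [Nat.not_lt_of_ge hi]
    · intro i hi; simp [hi]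
  have h1 : ∀ (s : PySem.Set (Int × Int)) (r : Nat),
      pv_scanA ((candy_grid.getD 0 []).length)
        (fun c => decide (c < (candy_grid.getD 0 []).length) && pv_matchable (pv_cell candy_grid r c))
        (fun c => pv_normalize (pv_cell candy_grid r c))
        (fun c => ((r : Int), (c : Int))) 0 s =
      pv_scanB ((candy_grid.getD 0 []).length) (fun c => pv_key candy_grid r c)
        (fun c => ((r : Int), (c : Int))) s := by
    intro s r
    have := hline ((candy_grid.getD 0 []).length) (fun c => pv_cell candy_grid r c)
      (fun c => ((r : Int), (c : Int))) s
    simpa [pv_key] using this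
  have h2 : ∀ (s : PySem.Set (Int × Int)) (c : Nat),
      pv_scanA (candy_grid.length)
        (fun r => decide (r < candy_grid.length) && pv_matchable (pv_cell candy_grid r c))
        (fun r => pv_normalize (pv_cell candy_grid r c))
        (fun r => ((r : Int), (c : Int))) 0 s =
      pv_scanB (candy_grid.length) (fun r => pv_key candy_grid r c)
        (fun r => ((r : Int), (c : Int))) s := by
    intro s c
    have := hline (candy_grid.length) (fun r => pv_cell candy_grid r c)
      (fun r => ((r : Int), (c : Int))) s
    simpa [pv_key] using this
  show (List.range ((candy_grid.getD 0 []).length)).foldl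
      (fun s c => pv_scanA candy_grid.length
        (fun r => decide (r < candy_grid.length) && pv_matchable (pv_cell candy_grid r c))
        (fun r => pv_normalize (pv_cell candy_grid r c))
        (fun r => ((r : Int), (c : Int))) 0 s)
      ((List.range candy_grid.length).foldl
        (fun s r => pv_scanA ((candy_grid.getD 0 []).length)
          (fun c => decide (c < (candy_grid.getD 0 []).length) && pv_matchable (pv_cell candy_grid r c))
          (fun c => pv_normalize (pv_cell candy_grid r c))
          (fun c => ((r : Int), (c : Int))) 0 s) PySem.Set.empty) =
    (List.range ((candy_grid.getD 0 []).length)).foldl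
      (fun s c => pv_scanB candy_grid.length (fun r => pv_key candy_grid r c)
        (fun r => ((r : Int), (c : Int))) s)
      ((List.range candy_grid.length).foldl
        (fun s r => pv_scanB ((candy_grid.getD 0 []).length) (fun c => pv_key candy_grid r c)
          (fun c => ((r : Int), (c : Int))) s) PySem.Set.empty)
  have einner : (List.range candy_grid.length).foldl
      (fun s r => pv_scanA ((candy_grid.getD 0 []).length)
        (fun c => decide (c < (candy_grid.getD 0 []).length) && pv_matchable (pv_cell candy_grid r c))
        (fun c => pv_normalize (pv_cell candy_grid r c))
        (fun c => ((r : Int), (c : Int))) 0 s) PySem.Set.empty =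
      (List.range candy_grid.length).foldl
        (fun s r => pv_scanB ((candy_grid.getD 0 []).length) (fun c => pv_key candy_grid r c)
          (fun c => ((r : Int), (c : Int))) s) PySem.Set.empty :=
    PySem.List.foldl_congr_mem _ _ _ _ (fun acc x _ => h1 acc x)
  rw [einner]
  exact PySem.List.foldl_congr_mem _ _ _ _ (fun acc x _ => h2 acc x)
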